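-- pv_equiv track=rewrite | github.com/junsu-kim0807/SpecPV | scripts/test_all_datasets.py | slugify_model_path
-- ===== SOURCE A (Python) =====
-- def slugify_model_path(path_or_repo: str) -> str:
--     # Keep it stable for directory names.
--     base = str(path_or_repo).rstrip("/").split("/")[-1]
--     base = base.lower()
--     out = []
--     for ch in base:
--         if ch.isalnum():
--             out.append(ch)
--         elif ch in ("-", "_", "."):
--             out.append("-")
--         else:
--             out.append("-")
--     slug = "".join(out)
--     slug = "-".join([s for s in slug.split("-") if s])
--     return slug or "model"
-- ===== SOURCE B (Python) =====
-- def slugify_model_path(path_or_repo: str) -> str: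
--     # Same preamble as the original; then one streaming pass that collapses
--     # separator runs with a 'pending dash' flag instead of map/split/join.
--     base = str(path_or_repo).rstrip("/").split("/")[-1]
--     base = base.lower()
--     out = []
--     pending = False
--     for ch in base:
--         if ch.isalnum():
--             if out and pending:
--                 out.append("-")
--             out.append(ch)
--             pending = False
--         elif out:
--             pending = True
--     return "".join(out) or "model"
-- ===== Notes on version B (the rewrite author's own statement) =====
-- stated objective: simpler
-- what changed: Replaced A's map-every-char-to-dash / split('-') / filter / join pipeline with a single streaming pass that keeps a pending-separator flag and emits one dash only between alnum runs.
import Mathlib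
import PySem

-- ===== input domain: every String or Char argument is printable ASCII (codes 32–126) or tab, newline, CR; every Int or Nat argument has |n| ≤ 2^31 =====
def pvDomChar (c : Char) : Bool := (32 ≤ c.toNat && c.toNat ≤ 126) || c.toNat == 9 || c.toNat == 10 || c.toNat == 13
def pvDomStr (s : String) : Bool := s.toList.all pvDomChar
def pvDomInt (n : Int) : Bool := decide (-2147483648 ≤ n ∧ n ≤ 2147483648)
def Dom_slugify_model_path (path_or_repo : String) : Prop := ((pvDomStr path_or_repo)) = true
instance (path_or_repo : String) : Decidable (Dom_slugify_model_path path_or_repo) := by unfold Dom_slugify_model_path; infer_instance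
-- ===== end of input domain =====

-- B replaces A's map-to-dashes / split / filter / join pipeline by a single streaming pass
-- with a pending-separator flag (objective: simpler). The two Pythons share their first two
-- preamble lines verbatim, ported once as pvBase.

-- str(x).rstrip("/").split("/")[-1].lower()  — shared preamble of both Pythons.
-- rstrip("/") is hand-ported (drop trailing '/' characters): exact, since the strip set is the single char '/'.
-- split("/") always returns a nonempty list, so the [-1] access never raises; ported as pyGet? (-1) with getD.
def pvBase (path_or_repo : String) : List Char :=
  let stripped := (path_or_repo.toList.reverse.dropWhile (fun c => c = '/')).reverse
  let parts := PySem.Chars.splitOn stripped ['/']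
  let last := (PySem.List.pyGet? parts (-1)).getD []
  PySem.Chars.lower last

-- ===== PORT A =====
def slugify_model_path (path_or_repo : String) : String :=
  let base := pvBase path_or_repo
  let out : List Char := base.foldl (fun acc ch =>
    if PySem.Chars.isalnum ch then acc ++ [ch]
    else if ch = '-' ∨ ch = '_' ∨ ch = '.' then acc ++ ['-']
    else acc ++ ['-']) []
  let slug := out
  let slug2 := PySem.Chars.join ['-'] ((PySem.Chars.splitOn slug ['-']).filter (fun s => s ≠ []))
  if slug2 = [] then "model" else String.ofList slug2

-- ===== PORT B =====
def pvBLoop : List Char → List Char → Bool → List Char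
  | [], out, _ => out
  | ch :: rest, out, pending =>
    if PySem.Chars.isalnum ch then
      pvBLoop rest ((if out ≠ [] ∧ pending then out ++ ['-'] else out) ++ [ch]) false
    else
      pvBLoop rest out (if out ≠ [] then true else pending)

def slugify_model_path_alt (path_or_repo : String) : String :=
  let base := pvBase path_or_repo
  let out := pvBLoop base [] false
  if out = [] then "model" else String.ofList out

-- ===== PRECONDITION & SPEC =====
def Spec_slugify_model_path (path_or_repo : String) (out : String) : Prop := out = slugify_model_path_alt path_or_repo
instance (path_or_repo : String) (out : String) : Decidable (Spec_slugify_model_path path_or_repo out) := by unfold Spec_slugify_model_path; infer_instance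

-- ===== CLAIM (what is proved, stated in full; the proofs are below) =====
def Claim_equal_slugify_model_path : Prop := ∀ (path_or_repo : String), Dom_slugify_model_path path_or_repo → Spec_slugify_model_path path_or_repo (slugify_model_path path_or_repo)

-- ===== LEMMAS AND PROOFS =====

-- A's per-char replacement: alnum chars stay, everything else becomes '-'.
def pvG (ch : Char) : Char := if PySem.Chars.isalnum ch then ch else '-'

-- Structural split on a single separator char: (first piece, remaining pieces).
def pvSoc (d : Char) : List Char → List Char × List (List Char)
  | [] => ([], [])
  | c :: cs =>
    let r := pvSoc d cs
    if c = d then ([], r.1 :: r.2) else (c :: r.1, r.2)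

-- (G, H): G cs = the collapsed slug of cs started fresh; H cs = the same but with the
-- first alnum run attaching directly to an already-open word.
def pvGH : List Char → List Char × List Char
  | [] => ([], [])
  | c :: cs =>
    let gh := pvGH cs
    if PySem.Chars.isalnum c then (c :: gh.2, c :: gh.2)
    else (gh.1, if gh.1 = [] then [] else '-' :: gh.1)

def pvJ (ps : List (List Char)) : List Char :=
  PySem.Chars.join ['-'] (ps.filter (fun s => s ≠ []))

def pvDash (l : List Char) : List Char := if l = [] then [] else '-' :: l

lemma pvSplitOn_go_single (d : Char) : ∀ fuel (l cur : List Char) (acc : List (List Char)),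
    l.length < fuel →
    PySem.Chars.splitOn.go [d] fuel l cur acc =
      acc.reverse ++ (cur.reverse ++ (pvSoc d l).1) :: (pvSoc d l).2 := by
  intro fuel
  induction fuel with
  | zero => intro l cur acc h; omega
  | succ fuel ih =>
    intro l cur acc h
    cases l with
    | nil => simp [PySem.Chars.splitOn.go, pvSoc]
    | cons c rest =>
      by_cases hc : c = d
      · subst hc
        rw [PySem.Chars.splitOn.go]
        simp only [List.isPrefixOf, BEq.rfl, Bool.true_and, if_true,
          List.length_cons, List.drop_succ_cons, List.length_nil, List.drop_zero]
        rw [ih rest [] (cur.reverse :: acc) (by simpa using Nat.lt_of_succ_lt_succ h)]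
        simp [pvSoc]
      · rw [PySem.Chars.splitOn.go]
        have hbeq : ([d].isPrefixOf (c :: rest)) = false := by
          simp [List.isPrefixOf]
          exact fun hh => absurd hh.symm hc
        rw [hbeq]
        simp only [if_false, Bool.false_eq_true]
        rw [ih rest (c :: cur) acc (by simpa using Nat.lt_of_succ_lt_succ h)]
        simp [pvSoc, hc]

lemma pvSplitOn_single (d : Char) (l : List Char) :
    PySem.Chars.splitOn l [d] = (pvSoc d l).1 :: (pvSoc d l).2 := by
  unfold PySem.Chars.splitOn
  rw [pvSplitOn_go_single d (l.length + 1) l [] [] (by omega)]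
  simp

lemma pvJoin_cons (x : List Char) (xs : List (List Char)) :
    PySem.Chars.join ['-'] (x :: xs) =
      x ++ if xs = [] then [] else '-' :: PySem.Chars.join ['-'] xs := by
  cases xs <;> simp [PySem.Chars.join, List.intercalate, List.intersperse]

lemma pvJ_nil_iff (ps : List (List Char)) :
    pvJ ps = [] ↔ ps.filter (fun s => s ≠ []) = [] := by
  unfold pvJ
  cases hf : ps.filter (fun s => s ≠ []) with
  | nil => simp [PySem.Chars.join, List.intercalate]
  | cons q qs =>
    have hq : q ≠ [] := by
      have := List.mem_filter.mp (hf ▸ List.mem_cons_self (l := qs))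
      simpa using this.2
    rw [pvJoin_cons]
    constructor
    · intro h
      rcases List.append_eq_nil_iff.mp h with ⟨h1, _⟩
      exact absurd h1 hq
    · intro h; cases h

lemma pvJ_cons (p : List Char) (ps : List (List Char)) :
    pvJ (p :: ps) = if p = [] then pvJ ps else p ++ pvDash (pvJ ps) := by
  by_cases hp : p = []
  · simp [pvJ, hp]
  · rw [if_neg hp]
    have h1 : pvJ (p :: ps) =
        p ++ if ps.filter (fun s => s ≠ []) = [] then [] else '-' :: pvJ ps := by
      unfold pvJ
      rw [List.filter_cons_of_pos (by simpa using hp), pvJoin_cons]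
    rw [h1]
    unfold pvDash
    by_cases hf : ps.filter (fun s => s ≠ []) = []
    · rw [if_pos hf, if_pos ((pvJ_nil_iff ps).mpr hf)]
    · rw [if_neg hf, if_neg (fun h => hf ((pvJ_nil_iff ps).mp h))]

lemma pvSoc_cons_ne (d c : Char) (cs : List Char) (h : c ≠ d) :
    pvSoc d (c :: cs) = (c :: (pvSoc d cs).1, (pvSoc d cs).2) := by simp [pvSoc, h]

lemma pvSoc_cons_eq (d : Char) (cs : List Char) :
    pvSoc d (d :: cs) = ([], (pvSoc d cs).1 :: (pvSoc d cs).2) := by simp [pvSoc]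

lemma pvGH_cons_alnum (c : Char) (cs : List Char) (h : PySem.Chars.isalnum c = true) :
    pvGH (c :: cs) = (c :: (pvGH cs).2, c :: (pvGH cs).2) := by simp [pvGH, h]

lemma pvGH_cons_not (c : Char) (cs : List Char) (h : ¬ PySem.Chars.isalnum c = true) :
    pvGH (c :: cs) = ((pvGH cs).1, if (pvGH cs).1 = [] then [] else '-' :: (pvGH cs).1) := by
  simp [pvGH, h]

-- A's collapse pipeline computes exactly (G, H) of pvGH.
lemma pvMain (cs : List Char) :
    pvJ ((pvSoc '-' (cs.map pvG)).1 :: (pvSoc '-' (cs.map pvG)).2) = (pvGH cs).1 ∧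
    (pvSoc '-' (cs.map pvG)).1 ++ pvDash (pvJ (pvSoc '-' (cs.map pvG)).2) = (pvGH cs).2 := by
  induction cs with
  | nil => simp [pvSoc, pvGH, pvJ, pvDash, PySem.Chars.join, List.intercalate]
  | cons c cs ih =>
    obtain ⟨ihG, ihH⟩ := ih
    by_cases hc : PySem.Chars.isalnum c
    · have hgc : pvG c = c := by unfold pvG; rw [if_pos hc]
      have hcne : c ≠ '-' := by
        intro h; rw [h] at hc; exact absurd hc (by decide)
      constructor
      · rw [List.map_cons, hgc, pvSoc_cons_ne '-' c _ hcne, pvGH_cons_alnum c cs hc]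
        rw [pvJ_cons, if_neg (by simp)]
        rw [← ihH]
        simp
      · rw [List.map_cons, hgc, pvSoc_cons_ne '-' c _ hcne, pvGH_cons_alnum c cs hc]
        rw [← ihH]
        simp
    · have hgc : pvG c = '-' := by unfold pvG; rw [if_neg hc]
      constructor
      · rw [List.map_cons, hgc, pvSoc_cons_eq, pvGH_cons_not c cs hc]
        rw [pvJ_cons, if_pos rfl]
        exact ihG
      · rw [List.map_cons, hgc, pvSoc_cons_eq, pvGH_cons_not c cs hc]
        simp only [List.nil_append, pvDash, ihG]

-- B's loop with a nonempty open word.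
lemma pvBLoop_open (cs : List Char) : ∀ (out : List Char) (pending : Bool), out ≠ [] →
    pvBLoop cs out pending =
      out ++ (if pending then pvDash (pvGH cs).1 else (pvGH cs).2) := by
  induction cs with
  | nil => intro out pending _; cases pending <;> simp [pvBLoop, pvGH, pvDash]
  | cons c cs ih =>
    intro out pending hout
    by_cases hc : PySem.Chars.isalnum c
    · simp only [pvBLoop, if_pos hc]
      rw [ih _ false (by simp)]
      simp only [pvGH, if_pos hc]
      cases pending with
      | false => simp [hout]
      | true => simp [hout, pvDash]
    · simp only [pvBLoop, if_neg hc]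
      rw [if_pos hout]
      rw [ih out true hout]
      simp only [pvGH, if_neg hc]
      cases pending <;> simp [pvDash]

lemma pvBLoop_fresh (cs : List Char) : pvBLoop cs [] false = (pvGH cs).1 := by
  induction cs with
  | nil => simp [pvBLoop, pvGH]
  | cons c cs ih =>
    by_cases hc : PySem.Chars.isalnum c
    · have h0 : ((if ([] : List Char) ≠ [] ∧ false = true then ([] : List Char) ++ ['-'] else []) ++ [c]) = [c] := by simp
      simp only [pvBLoop, if_pos hc, h0]
      rw [pvBLoop_open cs [c] false (by simp)]
      simp [pvGH, hc]
    · simp only [pvBLoop, if_neg hc]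
      simpa [pvGH, hc] using ih

-- A's foldl appends one replaced char per step: it is a map.
lemma pvFold_eq_map (base : List Char) :
    base.foldl (fun acc ch =>
      if PySem.Chars.isalnum ch then acc ++ [ch]
      else if ch = '-' ∨ ch = '_' ∨ ch = '.' then acc ++ ['-']
      else acc ++ ['-']) [] = base.map pvG := by
  have : (fun (acc : List Char) ch =>
      if PySem.Chars.isalnum ch then acc ++ [ch]
      else if ch = '-' ∨ ch = '_' ∨ ch = '.' then acc ++ ['-']
      else acc ++ ['-']) = fun acc ch => acc ++ [pvG ch] := by
    funext acc ch
    unfold pvG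
    split_ifs <;> rfl
  rw [this]
  simpa using PySem.List.foldl_append_singleton_eq_map pvG base []

-- ===== VERDICT (by name: the statement is the Claim_ definition above) =====
theorem slugify_model_path_spec : Claim_equal_slugify_model_path := by
  intro p _
  unfold Spec_slugify_model_path slugify_model_path slugify_model_path_alt
  simp only
  rw [pvFold_eq_map, pvSplitOn_single]
  rw [show PySem.Chars.join ['-']
        (List.filter (fun s => decide ¬s = []) ((pvSoc '-' ((pvBase p).map pvG)).1 :: (pvSoc '-' ((pvBase p).map pvG)).2))
      = pvJ ((pvSoc '-' ((pvBase p).map pvG)).1 :: (pvSoc '-' ((pvBase p).map pvG)).2) from rfl]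
  rw [(pvMain (pvBase p)).1, pvBLoop_fresh]
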